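-- pv_equiv track=rewrite | github.com/CyberKen10/Hex-IA | utils.py | dfs
-- ===== SOURCE A (Python) =====
-- def get_neighbors(position: tuple, player_positions: set) -> list:
--     row, col = position
--     directions = [(0, 1), (1, 0), (1, -1), (-1, 0), (-1, 1), (0, -1)]
--     neighbors = []
--     for dx, dy in directions:
--         new_pos = (row + dx, col + dy)
--         if new_pos in player_positions:
--             neighbors.append(new_pos)
--     return neighbors
--
-- def dfs(player_positions: set, player_id: int, size: int) -> bool:
--     if not player_positions:
--         return False
--     visited = set()
--     if player_id == 1:
--         start_positions = {pos for pos in player_positions if pos[1] == 0}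
--         target_col = size - 1
--         def is_goal(pos):
--             return pos[1] == target_col
--     else:
--         start_positions = {pos for pos in player_positions if pos[0] == 0}
--         target_row = size - 1
--         def is_goal(pos):
--             return pos[0] == target_row
--     if not start_positions:
--         return False
--     for start in start_positions:
--         if start in visited:
--             continue
--         stack = [start]
--         visited.add(start)
--         while stack:
--             current = stack.pop()
--             if is_goal(current):
--                 return True
--             for neighbor in get_neighbors(current, player_positions):
--                 if neighbor not in visited:
--                     visited.add(neighbor)
--                     stack.append(neighbor)
--     return False
-- ===== SOURCE B (Python) =====
-- def dfs(player_positions, player_id, size):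
--     cells = set(player_positions)
--     if player_id == 1:
--         starts = {p for p in cells if p[1] == 0}
--         def goal(p):
--             return p[1] == size - 1
--     else:
--         starts = {p for p in cells if p[0] == 0}
--         def goal(p):
--             return p[0] == size - 1
--     if not starts:
--         return False
--     dirs = ((0, 1), (1, 0), (1, -1), (-1, 0), (-1, 1), (0, -1))
--     reach = set(starts)
--     while True:
--         new = {(r + dr, c + dc) for (r, c) in reach for (dr, dc) in dirs} & cells - reach
--         if not new:
--             break
--         reach |= new
--     return any(goal(p) for p in reach)
-- ===== Notes on version B (the rewrite author's own statement) =====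
-- stated objective: alternative
-- what changed: Replaces the per-start stack DFS with early goal exit by a whole-frontier fixed-point saturation: the reachable set is grown with set algebra (neighbour candidates ∩ cells − reach) until stable, and the goal edge is checked once at the end.
import Mathlib
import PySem

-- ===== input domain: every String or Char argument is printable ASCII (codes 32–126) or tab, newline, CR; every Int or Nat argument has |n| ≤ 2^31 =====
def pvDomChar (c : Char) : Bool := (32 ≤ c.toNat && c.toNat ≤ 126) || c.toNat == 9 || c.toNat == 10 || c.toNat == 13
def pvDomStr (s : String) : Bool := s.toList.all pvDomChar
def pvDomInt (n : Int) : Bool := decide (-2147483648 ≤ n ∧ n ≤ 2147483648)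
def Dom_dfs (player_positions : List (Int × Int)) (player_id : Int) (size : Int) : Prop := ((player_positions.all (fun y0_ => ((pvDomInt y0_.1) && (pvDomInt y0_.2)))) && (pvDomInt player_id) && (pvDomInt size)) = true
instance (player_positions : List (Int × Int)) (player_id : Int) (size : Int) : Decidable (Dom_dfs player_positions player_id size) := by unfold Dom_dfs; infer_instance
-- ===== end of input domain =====

-- B replaces the per-start stack DFS (early goal exit) by a whole-frontier fixed-point
-- saturation of the reachable set, checking the goal edge once at the end (alternative
-- decomposition, similar cost).

-- ===== PORT A =====
-- The Python iterates over hash-ordered sets; the Bool result is order-independent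
-- (that is what the equivalence theorem proves), so the port iterates in list order.
def pvDirs : List (Int × Int) := [(0, 1), (1, 0), (1, -1), (-1, 0), (-1, 1), (0, -1)]

def getNeighbors (position : Int × Int) (playerPositions : List (Int × Int)) : List (Int × Int) :=
  pvDirs.foldl (fun neighbors d =>
    if (position.1 + d.1, position.2 + d.2) ∈ playerPositions then
      neighbors ++ [(position.1 + d.1, position.2 + d.2)]
    else neighbors) []

-- the `while stack:` loop; each iteration adds every pushed cell to visited, so
-- `positions.length + 1` fuel is enough (proved in the lemmas below)
def dfsWhile (positions : List (Int × Int)) (goal : Int × Int → Bool) :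
    Nat → List (Int × Int) → List (Int × Int) → Bool × List (Int × Int)
  | 0, visited, _ => (false, visited)
  | _ + 1, visited, [] => (false, visited)
  | fuel + 1, visited, current :: stack =>
    if goal current then (true, visited)
    else
      let vs := (getNeighbors current positions).foldl
        (fun vs nb => if nb ∈ vs.1 then vs else (vs.1 ++ [nb], nb :: vs.2))
        (visited, stack)
      dfsWhile positions goal fuel vs.1 vs.2

-- the `for start in start_positions:` loop (visited persists across starts)
def dfsOuter (positions : List (Int × Int)) (goal : Int × Int → Bool) (fuel : Nat) :
    List (Int × Int) → List (Int × Int) → Bool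
  | [], _ => false
  | s :: rest, visited =>
    if s ∈ visited then dfsOuter positions goal fuel rest visited
    else
      let r := dfsWhile positions goal fuel (visited ++ [s]) [s]
      if r.1 then true else dfsOuter positions goal fuel rest r.2

def dfs (player_positions : List (Int × Int)) (player_id : Int) (size : Int) : Bool :=
  if player_positions = [] then false
  else
    let sg : List (Int × Int) × (Int × Int → Bool) :=
      if player_id == 1 then
        (PySem.Set.ofList (player_positions.filter (fun p => p.2 == 0)),
         fun p => p.2 == size - 1)
      else
        (PySem.Set.ofList (player_positions.filter (fun p => p.1 == 0)),
         fun p => p.1 == size - 1)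
    if sg.1 = [] then false
    else dfsOuter player_positions sg.2 (player_positions.length + 1) sg.1 []

-- ===== PORT B =====
-- new = {(r+dr, c+dc) ...} & cells - reach
def pvNewFrontier (cells reach : List (Int × Int)) : List (Int × Int) :=
  PySem.Set.diff
    (PySem.Set.inter
      (PySem.Set.ofList (reach.flatMap (fun p => pvDirs.map (fun d => (p.1 + d.1, p.2 + d.2)))))
      cells)
    reach

-- the `while True:` saturation loop; every round grows reach, so `cells.length + 1`
-- fuel reaches the fixed point (proved below)
def pvSaturate (cells : List (Int × Int)) : Nat → List (Int × Int) → List (Int × Int)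
  | 0, reach => reach
  | fuel + 1, reach =>
    let nw := pvNewFrontier cells reach
    if nw = [] then reach else pvSaturate cells fuel (PySem.Set.union reach nw)

def dfs_alt (player_positions : List (Int × Int)) (player_id : Int) (size : Int) : Bool :=
  let cells := PySem.Set.ofList player_positions
  let sg : List (Int × Int) × (Int × Int → Bool) :=
    if player_id == 1 then
      (cells.filter (fun p => p.2 == 0), fun p => p.2 == size - 1)
    else
      (cells.filter (fun p => p.1 == 0), fun p => p.1 == size - 1)
  if sg.1 = [] then false
  else (pvSaturate cells (cells.length + 1) sg.1).any sg.2

-- ===== PRECONDITION & SPEC =====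
def Spec_dfs (player_positions : List (Int × Int)) (player_id : Int) (size : Int) (out : Bool) : Prop := out = dfs_alt player_positions player_id size
instance (player_positions : List (Int × Int)) (player_id : Int) (size : Int) (out : Bool) : Decidable (Spec_dfs player_positions player_id size out) := by unfold Spec_dfs; infer_instance

-- ===== CLAIM (what is proved, stated in full; the proofs are below) =====
def Claim_equal_dfs : Prop := ∀ (player_positions : List (Int × Int)) (player_id : Int) (size : Int), Dom_dfs player_positions player_id size → Spec_dfs player_positions player_id size (dfs player_positions player_id size)

-- ===== LEMMAS AND PROOFS =====

-- cells reachable from the start predicate `st` through the six directions inside `positions`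
inductive PvReach (positions : List (Int × Int)) (st : Int × Int → Prop) : Int × Int → Prop
  | base (p : Int × Int) : st p → PvReach positions st p
  | step (p d : Int × Int) : PvReach positions st p → d ∈ pvDirs →
      (p.1 + d.1, p.2 + d.2) ∈ positions → PvReach positions st (p.1 + d.1, p.2 + d.2)

def PvClosed (positions V : List (Int × Int)) : Prop :=
  ∀ p ∈ V, ∀ d ∈ pvDirs, (p.1 + d.1, p.2 + d.2) ∈ positions → (p.1 + d.1, p.2 + d.2) ∈ V

theorem pvReach_mem_closed {positions V : List (Int × Int)} {st : Int × Int → Prop}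
    (hst : ∀ p, st p → p ∈ V) (hc : PvClosed positions V) :
    ∀ q, PvReach positions st q → q ∈ V := by
  intro q h
  induction h with
  | base p hp => exact hst p hp
  | step p d _ hd hm ih => exact hc p ih d hd hm

theorem pvReach_exists_base {positions : List (Int × Int)} {st : Int × Int → Prop} {q : Int × Int}
    (h : PvReach positions st q) : ∃ p, st p := by
  induction h with
  | base p hp => exact ⟨p, hp⟩
  | step _ _ _ _ _ ih => exact ih

theorem nodup_subset_length_le (l m : List (Int × Int)) (h : l.Nodup) (hs : ∀ x ∈ l, x ∈ m) :
    l.length ≤ m.length := by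
  calc l.length = l.toFinset.card := (List.toFinset_card_of_nodup h).symm
    _ ≤ m.toFinset.card := Finset.card_le_card (by
        intro x hx
        simp only [List.mem_toFinset] at *
        exact hs x hx)
    _ ≤ m.length := m.toFinset_card_le

theorem getNeighbors_mem (position : Int × Int) (positions : List (Int × Int)) (q : Int × Int) :
    q ∈ getNeighbors position positions ↔
      q ∈ positions ∧ ∃ d ∈ pvDirs, q = (position.1 + d.1, position.2 + d.2) := by
  unfold getNeighbors
  have aux : ∀ (ds acc : List (Int × Int)),
      q ∈ ds.foldl (fun neighbors d =>
        if (position.1 + d.1, position.2 + d.2) ∈ positions then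
          neighbors ++ [(position.1 + d.1, position.2 + d.2)]
        else neighbors) acc
      ↔ q ∈ acc ∨ (q ∈ positions ∧ ∃ d ∈ ds, q = (position.1 + d.1, position.2 + d.2)) := by
    intro ds
    induction ds with
    | nil => simp
    | cons d t iht =>
      intro acc
      rw [List.foldl_cons, iht]
      by_cases hm : (position.1 + d.1, position.2 + d.2) ∈ positions
      · rw [if_pos hm]
        constructor
        · rintro (hq | hq)
          · rcases List.mem_append.mp hq with hq | hq
            · exact Or.inl hq
            · rcases List.mem_singleton.mp hq with rfl
              exact Or.inr ⟨hm, d, by simp⟩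
          · exact Or.inr ⟨hq.1, by obtain ⟨e, he, hqe⟩ := hq.2; exact ⟨e, by simp [he], hqe⟩⟩
        · rintro (hq | ⟨hq, e, he, hqe⟩)
          · exact Or.inl (List.mem_append.mpr (Or.inl hq))
          · rcases List.mem_cons.mp he with rfl | he
            · exact Or.inl (List.mem_append.mpr (Or.inr (by simp [hqe])))
            · exact Or.inr ⟨hq, e, he, hqe⟩
      · rw [if_neg hm]
        constructor
        · rintro (hq | ⟨hq, e, he, hqe⟩)
          · exact Or.inl hq
          · exact Or.inr ⟨hq, e, by simp [he], hqe⟩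
        · rintro (hq | ⟨hq, e, he, hqe⟩)
          · exact Or.inl hq
          · rcases List.mem_cons.mp he with rfl | he
            · exact absurd (hqe ▸ hq) hm
            · exact Or.inr ⟨hq, e, he, hqe⟩
  rw [aux]
  simp

theorem pvFold_spec (positions : List (Int × Int)) (nbs V S : List (Int × Int)) :
    (∀ p, p ∈ (nbs.foldl (fun vs nb => if nb ∈ vs.1 then vs else (vs.1 ++ [nb], nb :: vs.2)) (V, S)).1
        ↔ p ∈ V ∨ p ∈ nbs) ∧
    (∀ p, p ∈ (nbs.foldl (fun vs nb => if nb ∈ vs.1 then vs else (vs.1 ++ [nb], nb :: vs.2)) (V, S)).2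
        ↔ p ∈ S ∨ (p ∈ nbs ∧ p ∉ V)) ∧
    (V.Nodup → (nbs.foldl (fun vs nb => if nb ∈ vs.1 then vs else (vs.1 ++ [nb], nb :: vs.2)) (V, S)).1.Nodup) ∧
    (nbs.foldl (fun vs nb => if nb ∈ vs.1 then vs else (vs.1 ++ [nb], nb :: vs.2)) (V, S)).1.length + S.length
      = V.length + (nbs.foldl (fun vs nb => if nb ∈ vs.1 then vs else (vs.1 ++ [nb], nb :: vs.2)) (V, S)).2.length := by
  induction nbs generalizing V S with
  | nil => exact ⟨fun p => by simp, fun p => by simp, fun h => h, by simp⟩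
  | cons nb t ih =>
    rw [List.foldl_cons]
    by_cases hnb : nb ∈ V
    · rw [if_pos hnb]
      obtain ⟨m1, m2, nd, len⟩ := ih V S
      refine ⟨fun p => ?_, fun p => ?_, nd, len⟩
      · rw [m1]
        constructor
        · rintro (h | h)
          · exact Or.inl h
          · exact Or.inr (List.mem_cons_of_mem _ h)
        · rintro (h | h)
          · exact Or.inl h
          · rcases List.mem_cons.mp h with rfl | h
            · exact Or.inl hnb
            · exact Or.inr h
      · rw [m2]
        constructor
        · rintro (h | ⟨h, hv⟩)
          · exact Or.inl h
          · exact Or.inr ⟨List.mem_cons_of_mem _ h, hv⟩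
        · rintro (h | ⟨h, hv⟩)
          · exact Or.inl h
          · rcases List.mem_cons.mp h with rfl | h
            · exact absurd hnb hv
            · exact Or.inr ⟨h, hv⟩
    · rw [if_neg hnb]
      obtain ⟨m1, m2, nd, len⟩ := ih (V ++ [nb]) (nb :: S)
      refine ⟨fun p => ?_, fun p => ?_, fun hV => nd (by
        simp [List.nodup_append, hV]
        exact fun a b hab h => hnb (h ▸ hab)), by
        simp only [List.length_append, List.length_cons, List.length_nil] at len ⊢
        omega⟩
      · rw [m1]
        constructor
        · rintro (h | h)
          · rcases List.mem_append.mp h with h | h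
            · exact Or.inl h
            · exact Or.inr (by simp [List.mem_singleton.mp h])
          · exact Or.inr (List.mem_cons_of_mem _ h)
        · rintro (h | h)
          · exact Or.inl (List.mem_append.mpr (Or.inl h))
          · rcases List.mem_cons.mp h with rfl | h
            · exact Or.inl (List.mem_append.mpr (Or.inr (by simp)))
            · exact Or.inr h
      · rw [m2]
        constructor
        · rintro (h | ⟨h, hv⟩)
          · rcases List.mem_cons.mp h with rfl | h
            · exact Or.inr ⟨List.mem_cons_self .., hnb⟩
            · exact Or.inl h
          · refine Or.inr ⟨List.mem_cons_of_mem _ h, fun hV => hv (List.mem_append.mpr (Or.inl hV))⟩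
        · rintro (h | ⟨h, hv⟩)
          · exact Or.inl (List.mem_cons_of_mem _ h)
          · rcases List.mem_cons.mp h with rfl | h
            · exact Or.inl (List.mem_cons_self ..)
            · by_cases hpn : p = nb
              · exact Or.inl (hpn ▸ List.mem_cons_self ..)
              · exact Or.inr ⟨h, by simp [List.mem_append, hv, hpn]⟩

theorem dfsWhile_spec (positions : List (Int × Int)) (goal : Int × Int → Bool) (st : Int × Int → Prop)
    (fuel : Nat) (visited stack : List (Int × Int))
    (hsv : ∀ p ∈ stack, p ∈ visited)
    (hnd : visited.Nodup)
    (hvp : ∀ p ∈ visited, p ∈ positions)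
    (hblack : ∀ p ∈ visited, p ∉ stack → goal p = false ∧
        ∀ d ∈ pvDirs, (p.1 + d.1, p.2 + d.2) ∈ positions → (p.1 + d.1, p.2 + d.2) ∈ visited)
    (hreach : ∀ p ∈ visited, PvReach positions st p)
    (hfuel : positions.length + stack.length < fuel + visited.length) :
    (∀ p ∈ visited, p ∈ (dfsWhile positions goal fuel visited stack).2) ∧
    (dfsWhile positions goal fuel visited stack).2.Nodup ∧
    (∀ p ∈ (dfsWhile positions goal fuel visited stack).2, p ∈ positions) ∧
    (∀ p ∈ (dfsWhile positions goal fuel visited stack).2, PvReach positions st p) ∧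
    ((dfsWhile positions goal fuel visited stack).1 = true →
        ∃ q, PvReach positions st q ∧ goal q = true) ∧
    ((dfsWhile positions goal fuel visited stack).1 = false →
        (∀ p ∈ (dfsWhile positions goal fuel visited stack).2, goal p = false) ∧
        PvClosed positions (dfsWhile positions goal fuel visited stack).2) := by
  induction fuel generalizing visited stack with
  | zero =>
    exfalso
    have := nodup_subset_length_le visited positions hnd hvp
    omega
  | succ fuel ih =>
    cases stack with
    | nil =>
      exact ⟨fun p hp => hp, hnd, hvp, hreach,
        fun h => absurd h (by simp [dfsWhile]),
        fun _ => ⟨fun p hp => (hblack p hp (by simp)).1,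
                  fun p hp d hd hm => (hblack p hp (by simp)).2 d hd hm⟩⟩
    | cons current rest =>
      have hcur : current ∈ visited := hsv current (by simp)
      by_cases hg : goal current = true
      · refine ⟨fun p hp => by simpa [dfsWhile, hg] using hp, ?_, ?_, ?_,
          fun _ => ⟨current, hreach current hcur, hg⟩, ?_⟩
        · simpa [dfsWhile, hg] using hnd
        · intro p hp; exact hvp p (by simpa [dfsWhile, hg] using hp)
        · intro p hp; exact hreach p (by simpa [dfsWhile, hg] using hp)
        · intro h; rw [show (dfsWhile positions goal (fuel + 1) visited (current :: rest)).1 = true by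
            simp [dfsWhile, hg]] at h; cases h
      · have hgf : goal current = false := Bool.eq_false_iff.mpr hg
        obtain ⟨m1, m2, ndF, lenF⟩ := pvFold_spec positions (getNeighbors current positions) visited rest
        have hred : dfsWhile positions goal (fuel + 1) visited (current :: rest)
            = dfsWhile positions goal fuel
                ((getNeighbors current positions).foldl
                  (fun vs nb => if nb ∈ vs.1 then vs else (vs.1 ++ [nb], nb :: vs.2)) (visited, rest)).1
                ((getNeighbors current positions).foldl
                  (fun vs nb => if nb ∈ vs.1 then vs else (vs.1 ++ [nb], nb :: vs.2)) (visited, rest)).2 := by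
          simp [dfsWhile, hgf]
        have hsv' : ∀ p ∈ ((getNeighbors current positions).foldl
            (fun vs nb => if nb ∈ vs.1 then vs else (vs.1 ++ [nb], nb :: vs.2)) (visited, rest)).2,
            p ∈ ((getNeighbors current positions).foldl
            (fun vs nb => if nb ∈ vs.1 then vs else (vs.1 ++ [nb], nb :: vs.2)) (visited, rest)).1 := by
          intro p hp
          rcases (m2 p).mp hp with h | ⟨h, _⟩
          · exact (m1 p).mpr (Or.inl (hsv p (List.mem_cons_of_mem _ h)))
          · exact (m1 p).mpr (Or.inr h)
        have hvp' : ∀ p ∈ ((getNeighbors current positions).foldl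
            (fun vs nb => if nb ∈ vs.1 then vs else (vs.1 ++ [nb], nb :: vs.2)) (visited, rest)).1,
            p ∈ positions := by
          intro p hp
          rcases (m1 p).mp hp with h | h
          · exact hvp p h
          · exact ((getNeighbors_mem current positions p).mp h).1
        have hblack' : ∀ p ∈ ((getNeighbors current positions).foldl
            (fun vs nb => if nb ∈ vs.1 then vs else (vs.1 ++ [nb], nb :: vs.2)) (visited, rest)).1,
            p ∉ ((getNeighbors current positions).foldl
            (fun vs nb => if nb ∈ vs.1 then vs else (vs.1 ++ [nb], nb :: vs.2)) (visited, rest)).2 →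
            goal p = false ∧ ∀ d ∈ pvDirs, (p.1 + d.1, p.2 + d.2) ∈ positions →
              (p.1 + d.1, p.2 + d.2) ∈ ((getNeighbors current positions).foldl
                (fun vs nb => if nb ∈ vs.1 then vs else (vs.1 ++ [nb], nb :: vs.2)) (visited, rest)).1 := by
          intro p hp hnp
          by_cases hv : p ∈ visited
          · by_cases hpc : p = current
            · subst hpc
              refine ⟨hgf, fun d hd hm => (m1 _).mpr (Or.inr ?_)⟩
              exact (getNeighbors_mem p positions _).mpr ⟨hm, d, hd, rfl⟩
            · have hpr : p ∉ rest := fun hr => hnp ((m2 p).mpr (Or.inl hr))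
              have hb := hblack p hv (by
                intro hc
                rcases List.mem_cons.mp hc with h | h
                · exact hpc h
                · exact hpr h)
              exact ⟨hb.1, fun d hd hm => (m1 _).mpr (Or.inl (hb.2 d hd hm))⟩
          · have hnbm : p ∈ getNeighbors current positions := by
              rcases (m1 p).mp hp with h | h
              · exact absurd h hv
              · exact h
            exact absurd ((m2 p).mpr (Or.inr ⟨hnbm, hv⟩)) hnp
        have hreach' : ∀ p ∈ ((getNeighbors current positions).foldl
            (fun vs nb => if nb ∈ vs.1 then vs else (vs.1 ++ [nb], nb :: vs.2)) (visited, rest)).1,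
            PvReach positions st p := by
          intro p hp
          rcases (m1 p).mp hp with h | h
          · exact hreach p h
          · obtain ⟨hm, d, hd, rfl⟩ := (getNeighbors_mem current positions p).mp h
            exact PvReach.step current d (hreach current hcur) hd hm
        have hfuel' : positions.length + ((getNeighbors current positions).foldl
            (fun vs nb => if nb ∈ vs.1 then vs else (vs.1 ++ [nb], nb :: vs.2)) (visited, rest)).2.length
            < fuel + ((getNeighbors current positions).foldl
            (fun vs nb => if nb ∈ vs.1 then vs else (vs.1 ++ [nb], nb :: vs.2)) (visited, rest)).1.length := by
          simp only [List.length_cons] at hfuel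
          omega
        obtain ⟨c1, c2, c3, c4, c5, c6⟩ := ih _ _ hsv' (ndF hnd) hvp' hblack' hreach' hfuel'
        rw [hred]
        exact ⟨fun p hp => c1 p ((m1 p).mpr (Or.inl hp)), c2, c3, c4, c5, c6⟩

theorem dfsOuter_spec (positions : List (Int × Int)) (goal : Int × Int → Bool) (st : Int × Int → Prop)
    (fuel : Nat) (hfuel : positions.length < fuel) :
    ∀ (starts visited : List (Int × Int)),
    (∀ s ∈ starts, st s ∧ s ∈ positions) →
    visited.Nodup → (∀ p ∈ visited, p ∈ positions) → (∀ p ∈ visited, PvReach positions st p) →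
    (∀ p ∈ visited, goal p = false) → PvClosed positions visited →
    ((dfsOuter positions goal fuel starts visited = true → ∃ q, PvReach positions st q ∧ goal q = true) ∧
     (dfsOuter positions goal fuel starts visited = false →
       ∃ Vf : List (Int × Int), (∀ p ∈ visited, p ∈ Vf) ∧ (∀ s ∈ starts, s ∈ Vf) ∧
         PvClosed positions Vf ∧ (∀ p ∈ Vf, goal p = false))) := by
  intro starts
  induction starts with
  | nil =>
    intro visited _ hnd hvp hre hgf hcl
    refine ⟨fun h => absurd h (by simp [dfsOuter]), fun _ =>
      ⟨visited, fun p hp => hp, by simp, hcl, hgf⟩⟩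
  | cons s rest ih =>
    intro visited hst hnd hvp hre hgf hcl
    by_cases hs : s ∈ visited
    · have H := ih visited (fun t ht => hst t (List.mem_cons_of_mem _ ht)) hnd hvp hre hgf hcl
      have hred : dfsOuter positions goal fuel (s :: rest) visited
          = dfsOuter positions goal fuel rest visited := by
        simp [dfsOuter, hs]
      rw [hred]
      refine ⟨H.1, fun h => ?_⟩
      obtain ⟨Vf, h1, h2, h3, h4⟩ := H.2 h
      refine ⟨Vf, h1, fun t ht => ?_, h3, h4⟩
      rcases List.mem_cons.mp ht with rfl | ht
      · exact h1 t hs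
      · exact h2 t ht
    · have hsp := hst s (List.mem_cons_self ..)
      have hndv : (visited ++ [s]).Nodup := by
        simp [List.nodup_append, hnd]
        exact fun a b hab h => hs (h ▸ hab)
      have W := dfsWhile_spec positions goal st fuel (visited ++ [s]) [s]
        (by intro p hp; rcases List.mem_singleton.mp hp with rfl; simp)
        hndv
        (by
          intro p hp
          rcases List.mem_append.mp hp with h | h
          · exact hvp p h
          · rcases List.mem_singleton.mp h with rfl; exact hsp.2)
        (by
          intro p hp hps
          have hpv : p ∈ visited := by
            rcases List.mem_append.mp hp with h | h
            · exact h
            · exact absurd h hps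
          exact ⟨hgf p hpv, fun d hd hm => List.mem_append.mpr (Or.inl (hcl p hpv d hd hm))⟩)
        (by
          intro p hp
          rcases List.mem_append.mp hp with h | h
          · exact hre p h
          · rcases List.mem_singleton.mp h with rfl; exact PvReach.base p hsp.1)
        (by simp only [List.length_append, List.length_singleton, List.length_cons]; omega)
      obtain ⟨c1, c2, c3, c4, c5, c6⟩ := W
      cases hr : (dfsWhile positions goal fuel (visited ++ [s]) [s]).1 with
      | true =>
        have hred : dfsOuter positions goal fuel (s :: rest) visited = true := by
          simp [dfsOuter, hs, hr]
        rw [hred]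
        exact ⟨fun _ => c5 hr, fun h => by cases h⟩
      | false =>
        obtain ⟨hgf2, hcl2⟩ := c6 hr
        have hred : dfsOuter positions goal fuel (s :: rest) visited
            = dfsOuter positions goal fuel rest (dfsWhile positions goal fuel (visited ++ [s]) [s]).2 := by
          simp [dfsOuter, hs, hr]
        rw [hred]
        have H := ih _ (fun t ht => hst t (List.mem_cons_of_mem _ ht)) c2 c3 c4 hgf2 hcl2
        refine ⟨H.1, fun h => ?_⟩
        obtain ⟨Vf, h1, h2, h3, h4⟩ := H.2 h
        refine ⟨Vf, fun p hp => h1 p (c1 p (List.mem_append.mpr (Or.inl hp))), fun t ht => ?_, h3, h4⟩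
        rcases List.mem_cons.mp ht with rfl | ht
        · exact h1 t (c1 t (List.mem_append.mpr (Or.inr (List.mem_singleton.mpr rfl))))
        · exact h2 t ht

theorem dfsA_iff (positions : List (Int × Int)) (cnd gl : Int × Int → Bool) :
    (if positions = [] then false
     else if PySem.Set.ofList (positions.filter cnd) = [] then false
     else dfsOuter positions gl (positions.length + 1) (PySem.Set.ofList (positions.filter cnd)) []) = true
    ↔ ∃ q, PvReach positions (fun p => p ∈ positions ∧ cnd p = true) q ∧ gl q = true := by
  by_cases h0 : positions = []
  · subst h0
    rw [if_pos rfl]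
    simp only [Bool.false_eq_true, false_iff]
    rintro ⟨q, hq, _⟩
    obtain ⟨p, hp⟩ := pvReach_exists_base hq
    simp at hp
  · rw [if_neg h0]
    by_cases h1 : PySem.Set.ofList (positions.filter cnd) = []
    · rw [if_pos h1]
      simp only [Bool.false_eq_true, false_iff]
      rintro ⟨q, hq, _⟩
      obtain ⟨p, hp⟩ := pvReach_exists_base hq
      have : p ∈ PySem.Set.ofList (positions.filter cnd) :=
        (PySem.Set.mem_ofList _ _).mpr (List.mem_filter.mpr ⟨hp.1, hp.2⟩)
      rw [h1] at this
      simp at this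
    · rw [if_neg h1]
      have H := dfsOuter_spec positions gl (fun p => p ∈ positions ∧ cnd p = true)
        (positions.length + 1) (by omega)
        (PySem.Set.ofList (positions.filter cnd)) []
        (by
          intro s hsm
          have := List.mem_filter.mp ((PySem.Set.mem_ofList _ _).mp hsm)
          exact ⟨⟨this.1, this.2⟩, this.1⟩)
        (by simp) (by simp) (by simp) (by simp)
        (by intro p hp; simp at hp)
      constructor
      · exact H.1
      · rintro ⟨q, hq, hgl⟩
        by_contra hfalse
        have hf := Bool.eq_false_iff.mpr hfalse
        obtain ⟨Vf, _, hS, hcl, hgfV⟩ := H.2 hf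
        have hq' : q ∈ Vf := pvReach_mem_closed
          (fun p hp => hS p ((PySem.Set.mem_ofList _ _).mpr (List.mem_filter.mpr ⟨hp.1, hp.2⟩)))
          hcl q hq
        rw [hgfV q hq'] at hgl
        cases hgl

theorem pvNewFrontier_mem (positions reach : List (Int × Int)) (q : Int × Int) :
    q ∈ pvNewFrontier (PySem.Set.ofList positions) reach ↔
      q ∈ positions ∧ q ∉ reach ∧ ∃ p ∈ reach, ∃ d ∈ pvDirs, q = (p.1 + d.1, p.2 + d.2) := by
  simp only [pvNewFrontier, PySem.Set.diff, PySem.Set.inter, List.mem_filter,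
    PySem.Set.mem_ofList, List.mem_flatMap, List.mem_map, Bool.not_eq_eq_eq_not, Bool.not_true,
    List.contains_eq_mem, decide_eq_true_eq, decide_eq_false_iff_not]
  have hct : ∀ (l : List (Int × Int)) (x : Int × Int), PySem.Set.contains l x = true ↔ x ∈ l := by
    intro l x; simp [PySem.Set.contains]
  have hcf : ∀ (l : List (Int × Int)) (x : Int × Int), PySem.Set.contains l x = false ↔ x ∉ l := by
    intro l x; rw [Bool.eq_false_iff, Ne, hct]
  constructor
  · rintro ⟨⟨⟨p, hp, d, hd, rfl⟩, hc⟩, hnr⟩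
    exact ⟨(PySem.Set.mem_ofList _ _).mp ((hct _ _).mp hc), (hcf _ _).mp hnr, p, hp, d, hd, rfl⟩
  · rintro ⟨hc, hnr, p, hp, d, hd, rfl⟩
    exact ⟨⟨⟨p, hp, d, hd, rfl⟩, (hct _ _).mpr ((PySem.Set.mem_ofList _ _).mpr hc)⟩, (hcf _ _).mpr hnr⟩

theorem pvUnion_disjoint (reach nw : List (Int × Int)) (hd : ∀ x ∈ nw, x ∉ reach) (hn : nw.Nodup) :
    PySem.Set.union reach nw = reach ++ nw := by
  induction nw generalizing reach with
  | nil => simp [PySem.Set.union, PySem.Set.update]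
  | cons x t ih =>
    have hx : x ∉ reach := hd x (List.mem_cons_self ..)
    have h1 : PySem.Set.union reach (x :: t) = PySem.Set.union (reach ++ [x]) t := by
      simp [PySem.Set.union, PySem.Set.update, PySem.Set.add, hx]
    rw [h1, ih (reach ++ [x])]
    · simp
    · intro y hy
      have hyr := hd y (List.mem_cons_of_mem _ hy)
      have hyx : y ≠ x := fun h => (List.nodup_cons.mp hn).1 (h ▸ hy)
      simp [List.mem_append, hyr, hyx]
    · exact (List.nodup_cons.mp hn).2

theorem pvSaturate_spec (positions : List (Int × Int)) (st : Int × Int → Prop) :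
    ∀ (fuel : Nat) (reach : List (Int × Int)),
    reach.Nodup → (∀ p ∈ reach, p ∈ positions) → (∀ p ∈ reach, PvReach positions st p) →
    (PySem.Set.ofList positions).length < fuel + reach.length →
    (∀ p ∈ reach, p ∈ pvSaturate (PySem.Set.ofList positions) fuel reach) ∧
    (∀ p ∈ pvSaturate (PySem.Set.ofList positions) fuel reach, PvReach positions st p) ∧
    PvClosed positions (pvSaturate (PySem.Set.ofList positions) fuel reach) := by
  intro fuel
  induction fuel with
  | zero =>
    intro reach hnd hsub _ hfl
    exfalso
    have := nodup_subset_length_le reach (PySem.Set.ofList positions) hnd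
      (fun x hx => (PySem.Set.mem_ofList _ _).mpr (hsub x hx))
    omega
  | succ fuel ih =>
    intro reach hnd hsub hre hfl
    by_cases hnw : pvNewFrontier (PySem.Set.ofList positions) reach = []
    · have hred : pvSaturate (PySem.Set.ofList positions) (fuel + 1) reach = reach := by
        simp [pvSaturate, hnw]
      rw [hred]
      refine ⟨fun p hp => hp, hre, ?_⟩
      intro p hp d hd hm
      by_contra ht
      have : (p.1 + d.1, p.2 + d.2) ∈ pvNewFrontier (PySem.Set.ofList positions) reach :=
        (pvNewFrontier_mem positions reach _).mpr ⟨hm, ht, p, hp, d, hd, rfl⟩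
      rw [hnw] at this
      simp at this
    · have hnwnd : (pvNewFrontier (PySem.Set.ofList positions) reach).Nodup := by
        unfold pvNewFrontier PySem.Set.diff PySem.Set.inter
        exact ((PySem.Set.nodup_ofList _).filter _).filter _
      have hdisj : ∀ x ∈ pvNewFrontier (PySem.Set.ofList positions) reach, x ∉ reach :=
        fun x hx => ((pvNewFrontier_mem positions reach x).mp hx).2.1
      have hred : pvSaturate (PySem.Set.ofList positions) (fuel + 1) reach
          = pvSaturate (PySem.Set.ofList positions) fuel
              (reach ++ pvNewFrontier (PySem.Set.ofList positions) reach) := by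
        simp [pvSaturate, hnw, pvUnion_disjoint _ _ hdisj hnwnd]
      rw [hred]
      have hlen : 1 ≤ (pvNewFrontier (PySem.Set.ofList positions) reach).length :=
        List.length_pos_iff.mpr hnw
      have H := ih (reach ++ pvNewFrontier (PySem.Set.ofList positions) reach)
        (List.Nodup.append hnd hnwnd (fun a ha hb => hdisj a hb ha))
        (by
          intro p hp
          rcases List.mem_append.mp hp with h | h
          · exact hsub p h
          · exact ((pvNewFrontier_mem positions reach p).mp h).1)
        (by
          intro p hp
          rcases List.mem_append.mp hp with h | h
          · exact hre p h
          · obtain ⟨_, _, r, hr, d, hd, rfl⟩ := (pvNewFrontier_mem positions reach p).mp h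
            exact PvReach.step r d (hre r hr) hd
              ((pvNewFrontier_mem positions reach _).mp h).1)
        (by simp only [List.length_append]; omega)
      exact ⟨fun p hp => H.1 p (List.mem_append.mpr (Or.inl hp)), H.2.1, H.2.2⟩

theorem dfsB_iff (positions : List (Int × Int)) (cnd gl : Int × Int → Bool) :
    (if (PySem.Set.ofList positions).filter cnd = [] then false
     else (pvSaturate (PySem.Set.ofList positions) ((PySem.Set.ofList positions).length + 1)
            ((PySem.Set.ofList positions).filter cnd)).any gl) = true
    ↔ ∃ q, PvReach positions (fun p => p ∈ positions ∧ cnd p = true) q ∧ gl q = true := by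
  by_cases h1 : (PySem.Set.ofList positions).filter cnd = []
  · rw [if_pos h1]
    simp only [Bool.false_eq_true, false_iff]
    rintro ⟨q, hq, _⟩
    obtain ⟨p, hp⟩ := pvReach_exists_base hq
    have : p ∈ (PySem.Set.ofList positions).filter cnd :=
      List.mem_filter.mpr ⟨(PySem.Set.mem_ofList _ _).mpr hp.1, hp.2⟩
    rw [h1] at this
    simp at this
  · rw [if_neg h1]
    have H := pvSaturate_spec positions (fun p => p ∈ positions ∧ cnd p = true)
      ((PySem.Set.ofList positions).length + 1) ((PySem.Set.ofList positions).filter cnd)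
      ((PySem.Set.nodup_ofList _).filter _)
      (by
        intro p hp
        exact (PySem.Set.mem_ofList _ _).mp (List.mem_filter.mp hp).1)
      (by
        intro p hp
        have := List.mem_filter.mp hp
        exact PvReach.base p ⟨(PySem.Set.mem_ofList _ _).mp this.1, this.2⟩)
      (by omega)
    obtain ⟨hsub, hreS, hclS⟩ := H
    rw [List.any_eq_true]
    constructor
    · rintro ⟨q, hq, hgl⟩
      exact ⟨q, hreS q hq, hgl⟩
    · rintro ⟨q, hq, hgl⟩
      refine ⟨q, ?_, hgl⟩
      exact pvReach_mem_closed
        (fun p hp => hsub p (List.mem_filter.mpr ⟨(PySem.Set.mem_ofList _ _).mpr hp.1, hp.2⟩))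
        hclS q hq

-- ===== VERDICT (by name: the statement is the Claim_ definition above) =====
theorem dfs_spec : Claim_equal_dfs := by
  intro positions pid size _
  unfold Spec_dfs
  rw [Bool.eq_iff_iff]
  cases hpid : (pid == 1) with
  | true =>
    have hA := dfsA_iff positions (fun p => p.2 == 0) (fun p => p.2 == (size - 1 : Int))
    have hB := dfsB_iff positions (fun p => p.2 == 0) (fun p => p.2 == (size - 1 : Int))
    simp only [dfs, dfs_alt, hpid, if_true]
    exact hA.trans hB.symm
  | false =>
    have hA := dfsA_iff positions (fun p => p.1 == 0) (fun p => p.1 == (size - 1 : Int))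
    have hB := dfsB_iff positions (fun p => p.1 == 0) (fun p => p.1 == (size - 1 : Int))
    simp only [dfs, dfs_alt, hpid, Bool.false_eq_true, if_false]
    exact hA.trans hB.symm
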